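-- pv_equiv track=rewrite | github.com/Asghar76542/agentic-ai | sources/tools/tools.py | get_parameter_value
-- ===== SOURCE A (Python) =====
-- from typing import List, Tuple, Optional
--
-- def get_parameter_value(block: str, parameter_name: str) -> Optional[str]:
--     """Return the value of ``parameter_name`` within ``block``.
--
--     Parameters are expected in the form ``<name> = <value>`` but extra
--     whitespace is tolerated.
--     """
--     prefix = parameter_name.strip()
--     for line in block.splitlines():
--         line = line.strip()
--         if not line or not line.startswith(prefix):
--             continue
--         if "=" not in line:
--             continue
--         name, value = line.split("=", 1)
--         if name.strip() == prefix:
--             return value.strip()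
--     return None
-- ===== SOURCE B (Python) =====
-- def get_parameter_value(block, parameter_name):
--     """Return the value of ``parameter_name`` within ``block``.
--
--     Parses the whole block once into a first-occurrence table, then looks up.
--     """
--     table = {}
--     for raw in block.splitlines():
--         line = raw.strip()
--         if "=" in line:
--             name, value = line.split("=", 1)
--             key = name.strip()
--             if key not in table:
--                 table[key] = value.strip()
--     return table.get(parameter_name.strip())
-- ===== Notes on version B (the rewrite author's own statement) =====
-- stated objective: alternative
-- what changed: B replaces A's guarded early-return scan with a single parsing pass that builds a first-occurrence name-to-value dict for the whole block and then answers by one dict lookup, dropping the redundant startswith pre-filter.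
import Mathlib
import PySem

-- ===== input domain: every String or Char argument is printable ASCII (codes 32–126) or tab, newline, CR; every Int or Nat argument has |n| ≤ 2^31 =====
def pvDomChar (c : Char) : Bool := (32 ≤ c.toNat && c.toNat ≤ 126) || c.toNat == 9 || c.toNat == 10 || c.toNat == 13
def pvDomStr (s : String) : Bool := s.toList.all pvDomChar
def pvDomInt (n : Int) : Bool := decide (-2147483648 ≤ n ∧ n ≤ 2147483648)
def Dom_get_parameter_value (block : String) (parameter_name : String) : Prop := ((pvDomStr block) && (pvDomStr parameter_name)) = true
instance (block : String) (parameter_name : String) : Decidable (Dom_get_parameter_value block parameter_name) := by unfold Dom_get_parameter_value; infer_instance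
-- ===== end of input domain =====

-- B parses the whole block once into a first-occurrence name-to-value table and answers by one lookup (alternative decomposition, same cost).


-- ===== PORT A =====
-- A's loop: return at the first line whose stripped name equals the stripped parameter name.
def pvScanA (pfx : String) : List String → Option String
  | [] => none
  | l :: rest =>
    if PySem.Str.strip l = "" ∨ PySem.Str.startswith (PySem.Str.strip l) pfx = false then
      pvScanA pfx rest
    else if PySem.Str.isIn "=" (PySem.Str.strip l) = false then
      pvScanA pfx rest
    else
      match PySem.Str.splitMax? (PySem.Str.strip l) "=" 1 with
      | some (name :: value :: _) =>
          if PySem.Str.strip name = pfx then some (PySem.Str.strip value)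
          else pvScanA pfx rest
      | _ => pvScanA pfx rest

def get_parameter_value (block : String) (parameter_name : String) : Option String :=
  pvScanA (PySem.Str.strip parameter_name) (PySem.Str.splitlines block)

-- ===== PORT B =====
-- B's single parsing pass: insert each '='-line's key/value into the table unless the key is present.
def pvStepB (d : PySem.Dict String String) (raw : String) : PySem.Dict String String :=
  if PySem.Str.isIn "=" (PySem.Str.strip raw) then
    match PySem.Str.splitMax? (PySem.Str.strip raw) "=" 1 with
    | some (name :: value :: _) =>
        if d.contains (PySem.Str.strip name) then d
        else d.insert (PySem.Str.strip name) (PySem.Str.strip value)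
    | _ => d
  else d

def get_parameter_value_alt (block : String) (parameter_name : String) : Option String :=
  ((PySem.Str.splitlines block).foldl pvStepB PySem.Dict.empty).get?
    (PySem.Str.strip parameter_name)

-- ===== PRECONDITION & SPEC =====
def Spec_get_parameter_value (block : String) (parameter_name : String) (out : Option String) : Prop := out = get_parameter_value_alt block parameter_name
instance (block : String) (parameter_name : String) (out : Option String) : Decidable (Spec_get_parameter_value block parameter_name out) := by unfold Spec_get_parameter_value; infer_instance

-- ===== CLAIM (what is proved, stated in full; the proofs are below) =====
def Claim_equal_get_parameter_value : Prop := ∀ (block : String) (parameter_name : String), Dom_get_parameter_value block parameter_name → Spec_get_parameter_value block parameter_name (get_parameter_value block parameter_name)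

-- ===== LEMMAS AND PROOFS =====

theorem pvScanA_cons (k l : String) (rest : List String) :
    pvScanA k (l :: rest) =
      (if PySem.Str.strip l = "" ∨ PySem.Str.startswith (PySem.Str.strip l) k = false then
        pvScanA k rest
      else if PySem.Str.isIn "=" (PySem.Str.strip l) = false then
        pvScanA k rest
      else
        match PySem.Str.splitMax? (PySem.Str.strip l) "=" 1 with
        | some (name :: value :: _) =>
            if PySem.Str.strip name = k then some (PySem.Str.strip value)
            else pvScanA k rest
        | _ => pvScanA k rest) := rfl

-- A skips a line with no '=' in it.
theorem pvScanA_skip_noeq (k l : String) (rest : List String)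
    (hin : PySem.Str.isIn "=" (PySem.Str.strip l) = false) :
    pvScanA k (l :: rest) = pvScanA k rest := by
  rw [pvScanA_cons]
  by_cases h1 : PySem.Str.strip l = "" ∨ PySem.Str.startswith (PySem.Str.strip l) k = false
  · rw [if_pos h1]
  · rw [if_neg h1, if_pos hin]

-- A skips a line whose key is not the prefix.
theorem pvScanA_skip_key (k l : String) (rest : List String)
    (h : ∀ name value tl, PySem.Str.splitMax? (PySem.Str.strip l) "=" 1 = some (name :: value :: tl) →
         PySem.Str.strip name ≠ k) :
    pvScanA k (l :: rest) = pvScanA k rest := by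
  rw [pvScanA_cons]
  split_ifs with h1 h2
  · rfl
  · rfl
  · cases hsp : PySem.Str.splitMax? (PySem.Str.strip l) "=" 1 with
    | none => rfl
    | some parts =>
      match parts with
      | [] => rfl
      | [name] => rfl
      | name :: value :: tl =>
        simp only []
        rw [if_neg (h name value tl hsp)]

-- m = 0: the remaining input is flushed as the final piece.
theorem pv_go_zero (sep : List Char) : ∀ (fuel : Nat) (l cur : List Char) (acc : List (List Char)),
    PySem.Chars.splitOnMax.go sep fuel 0 l cur acc = ((cur.reverse ++ l) :: acc).reverse := by
  intro fuel l cur acc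
  cases fuel with
  | zero => simp [PySem.Chars.splitOnMax.go]
  | succ f => cases l <;> simp [PySem.Chars.splitOnMax.go]

-- m = 1, sep = "=": split at the first '=' if any.
theorem pv_go_one : ∀ (l : List Char) (fuel : Nat) (cur : List Char) (acc : List (List Char)),
    l.length < fuel →
    PySem.Chars.splitOnMax.go ['='] fuel 1 l cur acc =
      (if '=' ∈ l
       then acc.reverse ++ [cur.reverse ++ l.takeWhile (· ≠ '='), (l.dropWhile (· ≠ '=')).tail]
       else acc.reverse ++ [cur.reverse ++ l]) := by
  intro l
  induction l with
  | nil =>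
    intro fuel cur acc h
    cases fuel with
    | zero => omega
    | succ f => simp [PySem.Chars.splitOnMax.go]
  | cons c rest ih =>
    intro fuel cur acc h
    cases fuel with
    | zero => simp at h
    | succ f =>
      by_cases hc : c = '='
      · subst hc
        simp [PySem.Chars.splitOnMax.go, List.isPrefixOf, pv_go_zero]
      · have hp : (['='].isPrefixOf (c :: rest)) = false := by
          simp [List.isPrefixOf]; exact fun he => (hc he.symm).elim
        rw [show PySem.Chars.splitOnMax.go ['='] (f+1) 1 (c :: rest) cur acc =
              PySem.Chars.splitOnMax.go ['='] f 1 rest (c :: cur) acc by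
          simp [PySem.Chars.splitOnMax.go, hp]]
        rw [ih f (c :: cur) acc (by simpa using Nat.lt_of_succ_lt_succ h)]
        by_cases hm : '=' ∈ rest <;>
          simp [hm, hc, Ne.symm hc]

-- The m = 1 split of a line containing '='.
theorem pv_splitMax_char (cs : List Char) (h : '=' ∈ cs) :
    PySem.Chars.splitMax? cs ['='] 1 =
      some [cs.takeWhile (· ≠ '='), (cs.dropWhile (· ≠ '=')).tail] := by
  unfold PySem.Chars.splitMax? PySem.Chars.splitOnMax
  rw [if_neg (by decide), if_neg (by decide)]
  rw [show (1 : Int).toNat = 1 from rfl]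
  rw [pv_go_one cs (cs.length + 1) [] [] (by omega)]
  simp [h]

-- A prefix of a left-stripped list is itself left-stripped.
theorem pv_dropWhile_prefix (p : Char → Bool) (t u : List Char)
    (hpre : t <+: u) (hu : u.dropWhile p = u) : t.dropWhile p = t := by
  cases t with
  | nil => simp
  | cons c ct =>
    obtain ⟨s, hs⟩ := hpre
    subst hs
    simp only [List.cons_append] at hu
    by_cases hp : p c = true
    · exfalso
      rw [List.dropWhile_cons_of_pos hp] at hu
      have h1 := List.length_dropWhile_le p (ct ++ s)
      have h2 := congrArg List.length hu
      simp [List.length_append] at h1 h2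
      omega
    · rw [List.dropWhile_cons_of_neg (by simp [hp])]

-- strip of the name part of a stripped line is a prefix of the line.
theorem pv_strip_takeWhile_prefix (cs : List Char)
    (hl : cs.dropWhile PySem.Chars.isspace = cs) :
    PySem.Chars.strip (cs.takeWhile (· ≠ '=')) <+: cs := by
  have h1 : cs.takeWhile (· ≠ '=') <+: cs := List.takeWhile_prefix _
  have h2 : PySem.Chars.strip (cs.takeWhile (· ≠ '=')) <+: cs.takeWhile (· ≠ '=') := by
    unfold PySem.Chars.strip PySem.Chars.lstrip PySem.Chars.rstrip
    rw [pv_dropWhile_prefix _ _ cs h1 hl]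
    have h3 := List.dropWhile_suffix (l := (cs.takeWhile (· ≠ '=')).reverse) PySem.Chars.isspace
    have h4 := List.reverse_prefix.mpr h3
    simpa using h4
  exact h2.trans h1

-- strip output is left-stripped.
theorem pv_strip_lstripped (s : List Char) :
    (PySem.Chars.strip s).dropWhile PySem.Chars.isspace = PySem.Chars.strip s := by
  unfold PySem.Chars.strip PySem.Chars.rstrip
  apply pv_dropWhile_prefix _ _ (PySem.Chars.lstrip s)
  · have h3 := List.dropWhile_suffix (l := (PySem.Chars.lstrip s).reverse) PySem.Chars.isspace
    have h4 := List.reverse_prefix.mpr h3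
    simpa using h4
  · unfold PySem.Chars.lstrip
    exact List.dropWhile_idempotent _ _

-- The key asymmetry: a matching '='-line is non-empty and starts with the prefix.
theorem pv_guard (l pfx name : String) (tl : List String)
    (hin : PySem.Str.isIn "=" (PySem.Str.strip l) = true)
    (hsp : PySem.Str.splitMax? (PySem.Str.strip l) "=" 1 = some (name :: tl))
    (hkey : PySem.Str.strip name = pfx) :
    PySem.Str.strip l ≠ "" ∧ PySem.Str.startswith (PySem.Str.strip l) pfx = true := by
  set line := PySem.Str.strip l with hline
  have hmem : '=' ∈ line.toList := by
    have h5 := (PySem.Str.isIn_iff_infix (sub := "=") (s := line)).mp hin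
    simpa using (List.singleton_infix_iff _ _).mp (by simpa using h5)
  have hchars : PySem.Chars.splitMax? line.toList ['='] 1 =
      some [line.toList.takeWhile (· ≠ '='), (line.toList.dropWhile (· ≠ '=')).tail] :=
    pv_splitMax_char _ hmem
  have hmap := PySem.Str.splitMax?_map line "=" 1
  rw [hsp] at hmap
  simp only [show ("=" : String).toList = ['='] from rfl, hchars] at hmap
  have hname : name.toList = line.toList.takeWhile (· ≠ '=') := by
    simpa using congrArg (fun o => o.bind fun xs => xs.head?) hmap
  have hls : line.toList.dropWhile PySem.Chars.isspace = line.toList := by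
    have h6 : line.toList = PySem.Chars.strip l.toList := by simp [hline]
    rw [h6]; exact pv_strip_lstripped _
  have hpre : pfx.toList <+: line.toList := by
    have h7 : (PySem.Str.strip name).toList = PySem.Chars.strip name.toList := by simp
    rw [← hkey, h7, hname]
    exact pv_strip_takeWhile_prefix _ hls
  refine ⟨?_, ?_⟩
  · intro he
    rw [he] at hmem; simp at hmem
  · have h8 : PySem.Chars.startswith line.toList pfx.toList = true := by
      unfold PySem.Chars.startswith
      exact List.isPrefixOf_iff_prefix.mpr hpre
    simpa [PySem.Str.startswith] using h8

-- Main loop correspondence: looking up k after B's fold equals the old value orElse A's scan.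
theorem pv_fold_scan (k : String) : ∀ (lines : List String) (d : PySem.Dict String String),
    (lines.foldl pvStepB d).get? k = (d.get? k).or (pvScanA k lines) := by
  intro lines
  induction lines with
  | nil => intro d; simp [pvScanA]
  | cons l rest ih =>
    intro d
    rw [List.foldl_cons, ih]
    by_cases hin : PySem.Str.isIn "=" (PySem.Str.strip l) = true
    · cases hsp : PySem.Str.splitMax? (PySem.Str.strip l) "=" 1 with
      | none =>
        rw [show pvStepB d l = d by unfold pvStepB; rw [if_pos hin, hsp]]
        rw [pvScanA_skip_key k l rest
          (fun n v t hsp' => by rw [hsp] at hsp'; cases hsp')]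
      | some parts =>
        match parts with
        | [] =>
          rw [show pvStepB d l = d by unfold pvStepB; rw [if_pos hin, hsp]]
          rw [pvScanA_skip_key k l rest
            (fun n v t hsp' => by rw [hsp] at hsp'; simp at hsp')]
        | [name] =>
          rw [show pvStepB d l = d by unfold pvStepB; rw [if_pos hin, hsp]]
          rw [pvScanA_skip_key k l rest
            (fun n v t hsp' => by rw [hsp] at hsp'; simp at hsp')]
        | name :: value :: tl =>
          have hstep : pvStepB d l =
              (if d.contains (PySem.Str.strip name) then d
               else d.insert (PySem.Str.strip name) (PySem.Str.strip value)) := by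
            unfold pvStepB; rw [if_pos hin, hsp]
          by_cases hk : PySem.Str.strip name = k
          · -- the line's key is exactly k
            have hg := pv_guard l k name (value :: tl) hin hsp hk
            by_cases hc : (d.contains (PySem.Str.strip name)) = true
            · rw [hstep, if_pos hc]
              have h9 : (d.get? k).isSome := by
                rw [← hk]
                rw [PySem.Dict.contains_eq_isSome_get?] at hc
                exact hc
              obtain ⟨v, hv⟩ := Option.isSome_iff_exists.mp h9
              simp [hv]
            · rw [hstep, if_neg hc]
              have hnone : d.get? k = none := by
                rw [← hk]
                rw [PySem.Dict.contains_eq_isSome_get?] at hc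
                simpa using hc
              rw [hk, PySem.Dict.get?_insert_self, hnone]
              rw [show pvScanA k (l :: rest) = some (PySem.Str.strip value) by
                rw [pvScanA_cons]
                rw [if_neg (by
                  rw [not_or]
                  exact ⟨hg.1, by simp only [hg.2]; decide⟩)]
                rw [if_neg (by simp only [hin]; decide)]
                simp only [hsp]
                rw [if_pos hk]]
              simp
          · -- a different key: lookup at k unchanged, A skips the line
            rw [pvScanA_skip_key k l rest (fun n v t hsp' => by
              rw [hsp] at hsp'
              simp only [Option.some.injEq, List.cons.injEq] at hsp'
              rw [← hsp'.1]; exact hk)]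
            rw [hstep]
            by_cases hc : (d.contains (PySem.Str.strip name)) = true
            · rw [if_pos hc]
            · rw [if_neg hc, PySem.Dict.get?_insert_of_ne]
              exact fun he => hk he.symm
    · rw [show pvStepB d l = d by unfold pvStepB; rw [if_neg hin]]
      rw [pvScanA_skip_noeq k l rest (by simpa using hin)]

-- ===== VERDICT (by name: the statement is the Claim_ definition above) =====
theorem get_parameter_value_spec : Claim_equal_get_parameter_value := by
  intro block parameter_name _
  show get_parameter_value block parameter_name = get_parameter_value_alt block parameter_name
  unfold get_parameter_value get_parameter_value_alt
  rw [pv_fold_scan]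
  simp
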